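-- pv_equiv track=rewrite | github.com/Vascoengif/University-Projects | Aprendizagem Automática/Trabalho 1/main.py | validation_funtion
-- ===== SOURCE A (Python) =====
-- def validation_funtion(i, j, k, zdata, array):
--
-- 	if zdata[j-1] == zdata[-1] and j != 0:
-- 		return array
--
-- 	elif zdata[i] != zdata[j]:
-- 		if zdata[i][k] == zdata[i][-1]:
-- 			return array
-- 		elif zdata[i][k] == zdata[j][k]:
-- 			if zdata[i][-1] == zdata[j][-1]:
-- 				array.append(True)
-- 			else:
-- 				array.append(False)
-- 	j += 1
--
-- 	return validation_funtion(i, j, k, zdata, array)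
-- ===== SOURCE B (Python) =====
-- def validation_funtion(i, j, k, zdata, array):
--     # Two staged passes instead of A's recursion: first find the exclusive end
--     # index where the scan terminates, then extend `array` in place with one
--     # comprehension over the scanned range.
--     end = j
--     while True:
--         if zdata[end-1] == zdata[-1] and end != 0:
--             break
--         if zdata[i] != zdata[end] and zdata[i][k] == zdata[i][-1]:
--             break
--         end += 1
--     array.extend(zdata[i][-1] == zdata[t][-1]
--                  for t in range(j, end)
--                  if zdata[i] != zdata[t] and zdata[i][k] == zdata[t][k])
--     return array
-- ===== Notes on version B (the rewrite author's own statement) =====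
-- stated objective: alternative
-- what changed: A's tail recursion interleaving termination tests with appends is split into two staged passes: a first loop that only computes the scan's end index, then a single comprehension-based array.extend over range(j, end) producing all label-equality booleans.
-- outside the precondition, e.g. on validation_funtion(0, 0, 99, [[1], [1]], []): A returns [], B returns []
import Mathlib
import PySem

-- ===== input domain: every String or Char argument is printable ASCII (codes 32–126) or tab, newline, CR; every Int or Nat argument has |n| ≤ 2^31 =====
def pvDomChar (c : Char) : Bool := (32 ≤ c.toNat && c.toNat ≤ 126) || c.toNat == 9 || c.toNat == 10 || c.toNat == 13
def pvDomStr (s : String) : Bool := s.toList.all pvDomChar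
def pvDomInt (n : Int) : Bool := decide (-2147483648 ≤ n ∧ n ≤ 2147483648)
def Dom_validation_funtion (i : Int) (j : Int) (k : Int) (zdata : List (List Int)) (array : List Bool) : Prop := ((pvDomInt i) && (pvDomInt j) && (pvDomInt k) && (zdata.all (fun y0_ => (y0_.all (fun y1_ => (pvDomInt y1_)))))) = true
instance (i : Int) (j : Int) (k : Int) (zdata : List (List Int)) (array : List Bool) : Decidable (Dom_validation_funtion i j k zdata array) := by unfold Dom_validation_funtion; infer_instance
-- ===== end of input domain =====

-- B replaces A's recursion by two staged passes (find the scan's end index, then one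
-- comprehension extending the array); objective: alternative decomposition, same cost.
-- Both A and the Python B mutate and return the passed-in array object — the
-- equivalence proved here is about the return value.

-- ===== PORT A =====
-- A's recursion, step for step; fuel only makes it total, and under Pre_ it never runs out
-- (the run stops at j = len zdata at the latest).  Out-of-range indexing (Python IndexError,
-- excluded by Pre_) returns the current array.
def vfGoA (i : Int) (k : Int) (zdata : List (List Int)) : Nat → Int → List Bool → List Bool
  | 0, _, array => array
  | fuel + 1, j, array =>
    match PySem.List.pyGet? zdata (j - 1), PySem.List.pyGet? zdata (-1) with
    | some rjm1, some rlast =>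
      if rjm1 = rlast ∧ j ≠ 0 then array
      else
        match PySem.List.pyGet? zdata i, PySem.List.pyGet? zdata j with
        | some ri, some rj =>
          if ri ≠ rj then
            match PySem.List.pyGet? ri k, PySem.List.pyGet? ri (-1) with
            | some rik, some rilast =>
              if rik = rilast then array
              else
                match PySem.List.pyGet? rj k with
                | some rjk =>
                  if rik = rjk then
                    match PySem.List.pyGet? rj (-1) with
                    | some rjlast =>
                      vfGoA i k zdata fuel (j + 1)
                        (array ++ [if rilast = rjlast then true else false])
                    | none => array
                  else vfGoA i k zdata fuel (j + 1) array
                | none => array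
            | _, _ => array
          else vfGoA i k zdata fuel (j + 1) array
        | _, _ => array
    | _, _ => array

def validation_funtion (i : Int) (j : Int) (k : Int) (zdata : List (List Int)) (array : List Bool) : List Bool :=
  vfGoA i k zdata (2 * zdata.length + 2) j array

-- ===== PORT B =====
-- Phase 1 of Source B: the while-loop that only advances `end`; same fuel-for-totality
-- convention as port A, and a none from pyGet? (IndexError, outside Pre_) stops the loop.
def vfFindEnd (i : Int) (k : Int) (zdata : List (List Int)) : Nat → Int → Int
  | 0, e => e
  | fuel + 1, e =>
    match PySem.List.pyGet? zdata (e - 1), PySem.List.pyGet? zdata (-1) with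
    | some a, some b =>
      if a = b ∧ e ≠ 0 then e
      else
        match PySem.List.pyGet? zdata i, PySem.List.pyGet? zdata e with
        | some ri, some re =>
          if ri ≠ re then
            match PySem.List.pyGet? ri k, PySem.List.pyGet? ri (-1) with
            | some rik, some rilast =>
              if rik = rilast then e else vfFindEnd i k zdata fuel (e + 1)
            | _, _ => e
          else vfFindEnd i k zdata fuel (e + 1)
        | _, _ => e
    | _, _ => e

-- Phase 2 of Source B: the comprehension over range(j, end); a filtered t contributes the
-- label-equality boolean, all others contribute nothing (none also where Python raises).
def vfCollect (i : Int) (k : Int) (zdata : List (List Int)) (j : Int) (e : Int) : List Bool :=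
  (PySem.List.pyRange j e 1).filterMap (fun t =>
    match PySem.List.pyGet? zdata i, PySem.List.pyGet? zdata t with
    | some ri, some rt =>
      if ri ≠ rt then
        match PySem.List.pyGet? ri k, PySem.List.pyGet? rt k with
        | some rik, some rtk =>
          if rik = rtk then
            match PySem.List.pyGet? ri (-1), PySem.List.pyGet? rt (-1) with
            | some a, some b => some (decide (a = b))
            | _, _ => none
          else none
        | _, _ => none
      else none
    | _, _ => none)

def validation_funtion_alt (i : Int) (j : Int) (k : Int) (zdata : List (List Int)) (array : List Bool) : List Bool :=
  array ++ vfCollect i k zdata j (vfFindEnd i k zdata (2 * zdata.length + 2) j)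

-- ===== PRECONDITION & SPEC =====
-- Pre_ is a closed-form safe domain: either every index (i, j-1, the j's visited, k, -1) is in
-- Python's valid (possibly negative) range for every row, or the very first guard stops A at
-- once (so only zdata[j-1] and zdata[-1] are read).  It excludes the inputs on which A raises
-- IndexError, and conservatively also some inputs with an out-of-range index on which A
-- happens to return before ever reading it (see the cite in claim.json).
def Pre_validation_funtion (i : Int) (j : Int) (k : Int) (zdata : List (List Int)) (array : List Bool) : Prop :=
  (zdata ≠ [] ∧ (∀ r ∈ zdata, r ≠ []) ∧
   -(zdata.length : Int) ≤ i ∧ i < zdata.length ∧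
   1 - (zdata.length : Int) ≤ j ∧ j ≤ zdata.length ∧
   (∀ r ∈ zdata, -(r.length : Int) ≤ k ∧ k < r.length)) ∨
  (zdata ≠ [] ∧ j ≠ 0 ∧ -(zdata.length : Int) ≤ j - 1 ∧ j - 1 < zdata.length ∧
   PySem.List.pyGet? zdata (j - 1) = PySem.List.pyGet? zdata (-1))
instance (i : Int) (j : Int) (k : Int) (zdata : List (List Int)) (array : List Bool) : Decidable (Pre_validation_funtion i j k zdata array) := by unfold Pre_validation_funtion; infer_instance

def pvWitness_validation_funtion : Int × Int × Int × List (List Int) × List Bool :=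
  (0, 0, 0, [[1, 2], [3, 4]], [])

def Spec_validation_funtion (i : Int) (j : Int) (k : Int) (zdata : List (List Int)) (array : List Bool) (out : List Bool) : Prop := out = validation_funtion_alt i j k zdata array
instance (i : Int) (j : Int) (k : Int) (zdata : List (List Int)) (array : List Bool) (out : List Bool) : Decidable (Spec_validation_funtion i j k zdata array out) := by unfold Spec_validation_funtion; infer_instance

-- ===== CLAIM =====
def Claim_equal_validation_funtion : Prop := ∀ (i : Int) (j : Int) (k : Int) (zdata : List (List Int)) (array : List Bool), Dom_validation_funtion i j k zdata array → Pre_validation_funtion i j k zdata array → Spec_validation_funtion i j k zdata array (validation_funtion i j k zdata array)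

-- ===== LEMMAS AND PROOFS =====
theorem vfFindEnd_ge (i k : Int) (zdata : List (List Int)) :
    ∀ (fuel : Nat) (e : Int), e ≤ vfFindEnd i k zdata fuel e := by
  intro fuel
  induction fuel with
  | zero => intro e; simp [vfFindEnd]
  | succ n ih =>
    intro e
    simp only [vfFindEnd]
    repeat' split
    all_goals first | omega | (exact le_trans (by omega) (ih (e + 1)))

theorem pv_get_some {α : Type} (xs : List α) (t : Int)
    (h1 : -(xs.length : Int) ≤ t) (h2 : t < xs.length) :
    ∃ v, PySem.List.pyGet? xs t = some v := by
  cases hg : PySem.List.pyGet? xs t with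
  | some v => exact ⟨v, rfl⟩
  | none =>
    exfalso
    have := (PySem.List.pyGet?_eq_none_iff xs t).mp hg
    simp [PySem.Raise.InRange] at this
    omega

theorem vfCollect_nil (i k : Int) (zdata : List (List Int)) (j : Int) :
    vfCollect i k zdata j j = [] := by
  simp [vfCollect, PySem.List.pyRange_one_eq_nil le_rfl]

-- one good step: A recursing from j to j+1 matches peeling t = j off the comprehension
theorem main_invariant (i k : Int) (zdata : List (List Int))
    (hne : zdata ≠ []) (hrows : ∀ r ∈ zdata, r ≠ [])
    (hi0 : -(zdata.length : Int) ≤ i) (hi1 : i < zdata.length)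
    (hk : ∀ r ∈ zdata, -(r.length : Int) ≤ k ∧ k < r.length) :
    ∀ (fuel : Nat) (j : Int) (array : List Bool),
      1 - (zdata.length : Int) ≤ j → j ≤ zdata.length →
      vfGoA i k zdata fuel j array =
        array ++ vfCollect i k zdata j (vfFindEnd i k zdata fuel j) := by
  intro fuel
  induction fuel with
  | zero => intro j array _ _; simp [vfGoA, vfFindEnd, vfCollect_nil]
  | succ n ih =>
    intro j array hj1 hj2
    have hlen : 0 < zdata.length := List.length_pos_iff.mpr hne
    obtain ⟨rjm1, hjm1⟩ := pv_get_some zdata (j - 1) (by omega) (by omega)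
    obtain ⟨rlast, hlast⟩ := pv_get_some zdata (-1) (by omega) (by omega)
    obtain ⟨ri, hri⟩ := pv_get_some zdata i hi0 hi1
    by_cases hstop : rjm1 = rlast ∧ j ≠ 0
    · simp [vfGoA, vfFindEnd, hjm1, hlast, hstop, vfCollect_nil]
    · have hjlt : j < (zdata.length : Int) := by
        rcases lt_or_eq_of_le hj2 with h | h
        · exact h
        · exfalso
          apply hstop
          refine ⟨?_, by omega⟩
          have e1 : PySem.List.pyGet? zdata (j - 1) = zdata[(zdata.length - 1)]? := by
            rw [PySem.List.pyGet?_of_nonneg zdata (show (0:Int) ≤ j - 1 by omega)]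
            congr 1
            omega
          have e2 : PySem.List.pyGet? zdata (-1) = zdata[(zdata.length - 1)]? := by
            rw [PySem.List.pyGet?_neg_one, List.getLast?_eq_getElem?]
          have h3 : some rlast = some rjm1 := by rw [← hlast, ← hjm1, e1, e2]
          exact (Option.some_injective _ h3).symm
      obtain ⟨rj, hrj⟩ := pv_get_some zdata j (by omega) (by omega)
      have hrimem : ri ∈ zdata := PySem.List.mem_of_pyGet?_eq_some zdata hri
      have hrjmem : rj ∈ zdata := PySem.List.mem_of_pyGet?_eq_some zdata hrj
      have hril : 0 < ri.length := List.length_pos_iff.mpr (hrows ri hrimem)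
      have hrjl : 0 < rj.length := List.length_pos_iff.mpr (hrows rj hrjmem)
      obtain ⟨rik, hrik⟩ := pv_get_some ri k (hk ri hrimem).1 (hk ri hrimem).2
      obtain ⟨rilast, hrilast⟩ := pv_get_some ri (-1) (by omega) (by omega)
      obtain ⟨rjk, hrjk⟩ := pv_get_some rj k (hk rj hrjmem).1 (hk rj hrjmem).2
      obtain ⟨rjlast, hrjlast⟩ := pv_get_some rj (-1) (by omega) (by omega)
      have hcons : PySem.List.pyRange j (vfFindEnd i k zdata n (j + 1)) 1 =
          j :: PySem.List.pyRange (j + 1) (vfFindEnd i k zdata n (j + 1)) 1 :=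
        PySem.List.pyRange_one_cons (lt_of_lt_of_le (by omega) (vfFindEnd_ge i k zdata n (j + 1)))
      by_cases hne_ij : ri ≠ rj
      · by_cases hik : rik = rilast
        · simp [vfGoA, vfFindEnd, hjm1, hlast, hstop, hri, hrj, hne_ij, hrik, hrilast, hik,
            vfCollect_nil]
        · by_cases hjk : rik = rjk
          · have hIH := ih (j + 1) (array ++ [if rilast = rjlast then true else false])
              (by omega) (by omega)
            simp only [vfGoA, vfFindEnd, vfCollect, hjm1, hlast, hri, hrj, hrik, hrilast,
              hrjk, hrjlast, if_neg hstop, if_pos hne_ij, if_neg hik, if_pos hjk, hcons,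
              List.filterMap_cons] at hIH ⊢
            rw [hIH]
            simp
          · have hIH := ih (j + 1) array (by omega) (by omega)
            simp only [vfGoA, vfFindEnd, vfCollect, hjm1, hlast, hri, hrj, hrik, hrilast,
              hrjk, if_neg hstop, if_pos hne_ij, if_neg hik, if_neg hjk, hcons,
              List.filterMap_cons] at hIH ⊢
            rw [hIH]
      · have hIH := ih (j + 1) array (by omega) (by omega)
        simp only [vfGoA, vfFindEnd, vfCollect, hjm1, hlast, hri, hrj,
          if_neg hstop, if_neg hne_ij, hcons, List.filterMap_cons] at hIH ⊢
        rw [hIH]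

-- ===== VERDICT =====
theorem validation_funtion_spec : Claim_equal_validation_funtion := by
  intro i j k zdata array _ hpre
  unfold Spec_validation_funtion validation_funtion validation_funtion_alt
  rcases hpre with ⟨hne, hrows, hi0, hi1, hj1, hj2, hk⟩ | ⟨hne, hj0, hjl, hju, heq⟩
  · exact main_invariant i k zdata hne hrows hi0 hi1 hk _ j array hj1 hj2
  · obtain ⟨rjm1, hjm1⟩ := pv_get_some zdata (j - 1) hjl (by omega)
    have hlast : PySem.List.pyGet? zdata (-1) = some rjm1 := by rw [← heq, hjm1]
    simp [vfGoA, vfFindEnd, hjm1, hlast, hj0, vfCollect_nil]
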